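-- pv_equiv track=rewrite | github.com/yimingzhang2026/RL-for-scheduling-power-allocation | project_backend.py | get_AP_neighbor
-- ===== SOURCE A (Python) =====
-- import heapq
--
-- def get_AP_neighbor(distance_matrix_AP,NumNeighbor):
--     num = len(distance_matrix_AP[0])
--     AP_neighbors = []
--     for i in range(num):
--         distance_vec = list(distance_matrix_AP[i])
--         closest = heapq.nsmallest(NumNeighbor + 1, distance_vec)
--         subindex = []
--         for d in closest:
--             subindex.append(distance_vec.index(d))
--             distance_vec[distance_vec.index(d)] = 0
--         subindex.remove(i)
--         AP_neighbors.append(subindex)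
--
--     return AP_neighbors
-- ===== SOURCE B (Python) =====
-- def get_AP_neighbor(distance_matrix_AP, NumNeighbor):
--     num = len(distance_matrix_AP[0])
--     AP_neighbors = []
--     for i in range(num):
--         row = distance_matrix_AP[i]
--         order = sorted(range(len(row)), key=lambda j: row[j])
--         subindex = order[:NumNeighbor + 1]
--         subindex.remove(i)
--         AP_neighbors.append(subindex)
--     return AP_neighbors
-- ===== Notes on version B (the rewrite author's own statement) =====
-- stated objective: simpler
-- what changed: Replaces heapq.nsmallest plus the per-value list.index()/overwrite-with-0 resolution loop by a single stable argsort of each row sliced to the first NumNeighbor+1 indices.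
-- intended difference: On rows that contain a zero distance, have every negative entry among the NumNeighbor+1 smallest, and where a negative entry precedes the first zero or a second zero exists, A's overwrite-with-0 bookkeeping resolves a zero to an already-used position and returns an aliased/duplicated index, while B returns the true indices of the NumNeighbor+1 closest APs, which is the intended neighbor list. — e.g. on get_AP_neighbor([[-1, 0], [1, 0]], 1): A returns [[0], [0]], B returns [[1], [0]]
import Mathlib
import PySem

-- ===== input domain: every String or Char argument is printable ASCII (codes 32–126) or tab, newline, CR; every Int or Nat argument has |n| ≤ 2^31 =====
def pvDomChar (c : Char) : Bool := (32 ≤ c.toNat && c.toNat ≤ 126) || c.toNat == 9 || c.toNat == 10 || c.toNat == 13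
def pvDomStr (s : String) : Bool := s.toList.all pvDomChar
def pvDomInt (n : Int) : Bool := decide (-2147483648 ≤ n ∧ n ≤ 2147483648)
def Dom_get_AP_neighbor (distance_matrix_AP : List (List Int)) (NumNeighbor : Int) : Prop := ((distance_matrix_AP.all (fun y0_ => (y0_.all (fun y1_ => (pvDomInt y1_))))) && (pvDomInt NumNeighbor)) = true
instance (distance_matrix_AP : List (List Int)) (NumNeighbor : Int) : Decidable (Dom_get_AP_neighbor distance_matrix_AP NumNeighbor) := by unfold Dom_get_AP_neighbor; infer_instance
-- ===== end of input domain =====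

-- B replaces A's heapq.nsmallest + repeated list.index()/overwrite-with-0 scans by one stable
-- argsort of each row sliced to the first NumNeighbor+1 indices (objective: simpler); on rows
-- where A's overwrite-with-0 bookkeeping aliases an index (the D_ region below) B returns the
-- true closest indices instead.

-- ===== PORT A =====
-- heapq.nsmallest(n, xs) = sorted(xs)[:n] (its documented contract)
def get_AP_neighbor (distance_matrix_AP : List (List Int)) (NumNeighbor : Int) : List (List Int) :=
  let num := ((PySem.List.pyGet? distance_matrix_AP 0).getD []).length
  (PySem.List.pyRange 0 (num : Int) 1).foldl (fun AP_neighbors i =>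
    let distance_vec := (PySem.List.pyGet? distance_matrix_AP i).getD []
    let closest := (PySem.List.sorted distance_vec (fun x => x) false).take (NumNeighbor + 1).toNat
    let st := closest.foldl (fun (st : List Int × List Int) d =>
      let idx := (PySem.List.index? st.1 d).getD 0
      (st.1.set idx 0, st.2 ++ [(idx : Int)])) (distance_vec, ([] : List Int))
    let subindex := st.2
    AP_neighbors ++ [(PySem.List.remove? subindex i).getD subindex]) []

-- ===== PORT B =====
def get_AP_neighbor_alt (distance_matrix_AP : List (List Int)) (NumNeighbor : Int) : List (List Int) :=
  let num := ((PySem.List.pyGet? distance_matrix_AP 0).getD []).length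
  (PySem.List.pyRange 0 (num : Int) 1).foldl (fun AP_neighbors i =>
    let row := (PySem.List.pyGet? distance_matrix_AP i).getD []
    let order := PySem.List.sorted (PySem.List.pyRange 0 (row.length : Int) 1)
                   (fun j => PySem.List.pyGetD row j 0) false
    let subindex := PySem.List.slice order none (some (NumNeighbor + 1))
    AP_neighbors ++ [(PySem.List.remove? subindex i).getD subindex]) []

-- ===== PRECONDITION & SPEC =====
-- Pre_ states exactly the inputs on which Python A returns normally (everything else raises
-- IndexError or ValueError): nonempty matrix, at least as many rows as columns of row 0, and for
-- every i the i-th emitted index list contains i, so subindex.remove(i) succeeds: either row i's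
-- own entry is nonzero with stable-sort rank below NumNeighbor+1, or i is the first non-positive
-- position of a row containing a 0 whose negative entries all fit inside the NumNeighbor+1 smallest.
def Pre_get_AP_neighbor (distance_matrix_AP : List (List Int)) (NumNeighbor : Int) : Prop :=
  distance_matrix_AP ≠ [] ∧
  (distance_matrix_AP.headD []).length ≤ distance_matrix_AP.length ∧
  ∀ i < (distance_matrix_AP.headD []).length,
    ((i < (distance_matrix_AP.getD i []).length ∧
      (distance_matrix_AP.getD i []).getD i 0 ≠ 0 ∧
      (List.range (distance_matrix_AP.getD i []).length).countP (fun j =>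
        decide ((distance_matrix_AP.getD i []).getD j 0 < (distance_matrix_AP.getD i []).getD i 0 ∨
                ((distance_matrix_AP.getD i []).getD j 0 = (distance_matrix_AP.getD i []).getD i 0 ∧
                 j < i))) < (NumNeighbor + 1).toNat)
     ∨ (i < (distance_matrix_AP.getD i []).length ∧
        (distance_matrix_AP.getD i []).getD i 0 ≤ 0 ∧
        (∀ p < i, 0 < (distance_matrix_AP.getD i []).getD p 0) ∧
        (0 : Int) ∈ distance_matrix_AP.getD i [] ∧
        (distance_matrix_AP.getD i []).countP (fun x => decide (x < 0)) < (NumNeighbor + 1).toNat))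
instance (distance_matrix_AP : List (List Int)) (NumNeighbor : Int) : Decidable (Pre_get_AP_neighbor distance_matrix_AP NumNeighbor) := by unfold Pre_get_AP_neighbor; infer_instance

def pvWitness_get_AP_neighbor : List (List Int) × Int := ([[0, 1], [1, 0]], 1)

-- On rows where a zero distance lands among the NumNeighbor+1 smallest either after a negative
-- entry or together with a second zero, A's overwrite-with-0 bookkeeping resolves that zero to an
-- already-used position and emits an aliased/duplicated index; B returns the true indices of the
-- NumNeighbor+1 closest APs, which is the intended neighbor list.
def D_get_AP_neighbor (distance_matrix_AP : List (List Int)) (NumNeighbor : Int) : Prop :=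
  ∃ v ∈ distance_matrix_AP.take distance_matrix_AP.head!.length,
    v.contains 0 ∧ v.countP (· < 0) < (NumNeighbor + 1).toNat ∧
    (v.findIdx (· < 0) < v.idxOf 0 ∨
      2 ≤ v.count 0 ∧ v.countP (· < 0) + 2 ≤ (NumNeighbor + 1).toNat)
instance (distance_matrix_AP : List (List Int)) (NumNeighbor : Int) : Decidable (D_get_AP_neighbor distance_matrix_AP NumNeighbor) := by unfold D_get_AP_neighbor; infer_instance

def Spec_get_AP_neighbor (distance_matrix_AP : List (List Int)) (NumNeighbor : Int) (out : List (List Int)) : Prop := ¬ D_get_AP_neighbor distance_matrix_AP NumNeighbor → out = get_AP_neighbor_alt distance_matrix_AP NumNeighbor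
instance (distance_matrix_AP : List (List Int)) (NumNeighbor : Int) (out : List (List Int)) : Decidable (Spec_get_AP_neighbor distance_matrix_AP NumNeighbor out) := by unfold Spec_get_AP_neighbor; infer_instance

def pvDiffWitness_get_AP_neighbor : List (List Int) × Int := ([[-1, 0], [1, 0]], 1)
def pvDiffWitnessOut_get_AP_neighbor : (List (List Int)) × (List (List Int)) := ([[0], [0]], [[1], [0]])

-- ===== CLAIM (what is proved, stated in full; the proofs are below) =====
def Claim_unchanged_get_AP_neighbor : Prop := ∀ (distance_matrix_AP : List (List Int)) (NumNeighbor : Int), Dom_get_AP_neighbor distance_matrix_AP NumNeighbor → Pre_get_AP_neighbor distance_matrix_AP NumNeighbor → Spec_get_AP_neighbor distance_matrix_AP NumNeighbor (get_AP_neighbor distance_matrix_AP NumNeighbor)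
def Claim_changed_get_AP_neighbor : Prop := Dom_get_AP_neighbor (pvDiffWitness_get_AP_neighbor.1) (pvDiffWitness_get_AP_neighbor.2) ∧ Pre_get_AP_neighbor (pvDiffWitness_get_AP_neighbor.1) (pvDiffWitness_get_AP_neighbor.2) ∧ D_get_AP_neighbor (pvDiffWitness_get_AP_neighbor.1) (pvDiffWitness_get_AP_neighbor.2) ∧ get_AP_neighbor (pvDiffWitness_get_AP_neighbor.1) (pvDiffWitness_get_AP_neighbor.2) = pvDiffWitnessOut_get_AP_neighbor.1 ∧ get_AP_neighbor_alt (pvDiffWitness_get_AP_neighbor.1) (pvDiffWitness_get_AP_neighbor.2) = pvDiffWitnessOut_get_AP_neighbor.2 ∧ pvDiffWitnessOut_get_AP_neighbor.1 ≠ pvDiffWitnessOut_get_AP_neighbor.2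
def Claim_exact_get_AP_neighbor : Prop := ∀ (distance_matrix_AP : List (List Int)) (NumNeighbor : Int), Dom_get_AP_neighbor distance_matrix_AP NumNeighbor → Pre_get_AP_neighbor distance_matrix_AP NumNeighbor → D_get_AP_neighbor distance_matrix_AP NumNeighbor → get_AP_neighbor distance_matrix_AP NumNeighbor ≠ get_AP_neighbor_alt distance_matrix_AP NumNeighbor

-- ===== LEMMAS AND PROOFS =====

def pvKey (v : List Int) : Int → Int := fun j => PySem.List.pyGetD v j 0
def pvM0 (v : List Int) : Int :=
  ((((List.range v.length).find? (fun p => decide (v.getD p 0 ≤ 0))).getD 0 : Nat) : Int)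
def pvF (v : List Int) : Int → Int := fun j => if PySem.List.pyGetD v j 0 = 0 then pvM0 v else j
def pvArgsort (v : List Int) : List Int :=
  PySem.List.sorted (PySem.List.pyRange 0 (v.length : Int) 1) (pvKey v) false
def pvZero (v : List Int) (pre : List Int) : List Int :=
  pre.foldl (fun w j => w.set j.toNat 0) v
def pvLex (key : Int → Int) (a b : Int) : Prop := key a < key b ∨ (key a = key b ∧ a < b)
def pvStepA (st : List Int × List Int) (d : Int) : List Int × List Int :=
  let idx := (PySem.List.index? st.1 d).getD 0
  (st.1.set idx 0, st.2 ++ [(idx : Int)])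
-- the per-row deviation condition (the body of D_ for one row)
def pvDev (v : List Int) (t : Nat) : Prop :=
  v.contains 0 ∧ v.countP (· < 0) < t ∧
  (v.findIdx (· < 0) < v.idxOf 0 ∨
    2 ≤ v.count 0 ∧ v.countP (· < 0) + 2 ≤ t)

theorem pvHead (m : List (List Int)) : m.head! = m.headD [] := by
  cases m <;> rfl

theorem pvD_iff (m : List (List Int)) (k : Int) :
    D_get_AP_neighbor m k ↔ ∃ v ∈ m.take (m.headD []).length, pvDev v (k + 1).toNat := by
  unfold D_get_AP_neighbor pvDev
  rw [pvHead]

-- ---- argsort basics ----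
theorem pvArgsort_perm (v : List Int) : (pvArgsort v).Perm (PySem.List.pyRange 0 (v.length : Int) 1) :=
  PySem.List.sorted_perm _ _ _

theorem pvMem_argsort {v : List Int} {j : Int} (h : j ∈ pvArgsort v) : 0 ≤ j ∧ j < (v.length : Int) := by
  have := (pvArgsort_perm v).mem_iff.mp h
  exact (PySem.List.mem_pyRange_one).mp this

theorem pvMem_argsort_of {v : List Int} {j : Int} (h0 : 0 ≤ j) (h1 : j < (v.length : Int)) :
    j ∈ pvArgsort v :=
  (pvArgsort_perm v).mem_iff.mpr (PySem.List.mem_pyRange_one.mpr ⟨h0, h1⟩)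

theorem pvMap_key_argsort_perm (v : List Int) : ((pvArgsort v).map (pvKey v)).Perm v := by
  have h1 := (pvArgsort_perm v).map (pvKey v)
  have h2 : (PySem.List.pyRange 0 (v.length : Int) 1).map (pvKey v) = v :=
    PySem.List.map_pyGetD_pyRange_zero' v 0
  rwa [h2] at h1

theorem pvSorted_eq (v : List Int) :
    PySem.List.sorted v (fun x => x) false = (pvArgsort v).map (pvKey v) := by
  refine PySem.List.sorted_id_eq_of_perm_of_pairwise v _ (pvMap_key_argsort_perm v) ?_
  refine (List.pairwise_map).mpr ?_
  have h := PySem.List.sorted_pairwise (PySem.List.pyRange 0 (v.length : Int) 1) (pvKey v)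
  exact h

-- ---- stability of the PySem insertion sort ----
theorem pvInsert_pairwise (key : Int → Int) (x : Int) (acc : List Int)
    (h1 : acc.Pairwise (pvLex key)) (h2 : ∀ a ∈ acc, a < x) :
    (PySem.List.insertBy (fun a b => decide (key a < key b)) x acc).Pairwise (pvLex key) := by
  induction acc with
  | nil => simp [PySem.List.insertBy]
  | cons y ys ih =>
    rw [List.pairwise_cons] at h1
    by_cases hb : key x < key y
    · simp only [PySem.List.insertBy, hb, decide_true, if_true]
      refine List.Pairwise.cons ?_ (List.Pairwise.cons h1.1 h1.2)
      intro z hz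
      rcases List.mem_cons.mp hz with rfl | hz
      · exact Or.inl hb
      · have := h1.1 z hz
        left
        rcases this with h | ⟨h, _⟩ <;> omega
    · simp only [PySem.List.insertBy, hb, decide_false]
      refine List.Pairwise.cons ?_ (ih h1.2 (fun a ha => h2 a (List.mem_cons_of_mem _ ha)))
      intro z hz
      rcases (PySem.List.mem_insertBy _ _ _ _).mp hz with rfl | hz
      · rcases lt_or_eq_of_le (not_lt.mp hb) with h | h
        · exact Or.inl h
        · exact Or.inr ⟨h, h2 y (by simp)⟩
      · exact h1.1 z hz

theorem pvFoldl_insert_pairwise (key : Int → Int) :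
    ∀ (xs : List Int) (acc : List Int), xs.Pairwise (· < ·) → acc.Pairwise (pvLex key) →
    (∀ a ∈ acc, ∀ x ∈ xs, a < x) →
    (xs.foldl (fun acc x => PySem.List.insertBy (fun a b => decide (key a < key b)) x acc) acc).Pairwise (pvLex key)
  | [], acc, _, h1, _ => h1
  | x :: xs, acc, hxs, h1, h2 => by
    rw [List.pairwise_cons] at hxs
    refine pvFoldl_insert_pairwise key xs _ hxs.2 ?_ ?_
    · exact pvInsert_pairwise key x acc h1 (fun a ha => h2 a ha x (by simp))
    · intro a ha y hy
      rcases (PySem.List.mem_insertBy _ _ _ _).mp ha with rfl | ha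
      · exact hxs.1 y hy
      · exact h2 a ha y (List.mem_cons_of_mem _ hy)

theorem pvArgsort_pairwise_lex (v : List Int) : (pvArgsort v).Pairwise (pvLex (pvKey v)) := by
  unfold pvArgsort
  rw [PySem.List.sorted_eq_foldl_insertBy]
  exact pvFoldl_insert_pairwise _ _ [] (PySem.List.pairwise_lt_pyRange_one 0 _) (by simp) (by simp)

theorem pvArgsort_nodup (v : List Int) : (pvArgsort v).Nodup :=
  ((pvArgsort_perm v).nodup_iff).mpr (PySem.List.nodup_pyRange_one _ _)

-- ---- first non-positive position ----
theorem pvM0_spec (v : List Int) (q : Nat) (hq : q < v.length) (hq0 : v.getD q 0 ≤ 0) :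
    ∃ m : Nat, m < v.length ∧ pvM0 v = (m : Int) ∧ v.getD m 0 ≤ 0 ∧
      (∀ p, p < m → 0 < v.getD p 0) ∧ m ≤ q := by
  have hsome : ((List.range v.length).find? (fun p => decide (v.getD p 0 ≤ 0))).isSome := by
    rw [List.find?_isSome]
    exact ⟨q, by simp [hq], by simpa using hq0⟩
  obtain ⟨b, hb⟩ := Option.isSome_iff_exists.mp hsome
  have hb' := List.find?_eq_some_iff_getElem.mp hb
  obtain ⟨hPb, i, hi, hib, hmin⟩ := hb'
  have hilen : i < v.length := by simpa using hi
  have hbi : b = i := by simpa using hib.symm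
  subst hbi
  refine ⟨b, hilen, ?_, by simpa using hPb, ?_, ?_⟩
  · unfold pvM0
    rw [hb]
    simp
  · intro p hp
    have h2 := hmin p hp
    simp only [List.getElem_range, Bool.not_eq_true', decide_eq_false_iff_not, not_le] at h2
    exact h2
  · by_contra h
    have h2 := hmin q (by omega)
    simp only [List.getElem_range, Bool.not_eq_true', decide_eq_false_iff_not, not_le] at h2
    omega

-- ---- zeroing ----
theorem pvZero_nil (v : List Int) : pvZero v [] = v := rfl

theorem pvZero_cons (v : List Int) (j : Int) (pre : List Int) :
    pvZero v (j :: pre) = pvZero (v.set j.toNat 0) pre := rfl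

theorem pvZero_append (v : List Int) (pre : List Int) (j : Int) :
    pvZero v (pre ++ [j]) = (pvZero v pre).set j.toNat 0 := by
  simp [pvZero, List.foldl_append]

theorem pvZero_length (v : List Int) (pre : List Int) : (pvZero v pre).length = v.length := by
  induction pre generalizing v with
  | nil => rfl
  | cons j pre ih => rw [pvZero_cons, ih, List.length_set]

theorem pvZero_getElem? (v : List Int) (pre : List Int) (hpre : ∀ j ∈ pre, 0 ≤ j)
    (p : Nat) :
    (pvZero v pre)[p]? = if ((p : Int) ∈ pre) then (if p < v.length then some 0 else none) else v[p]? := by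
  induction pre generalizing v with
  | nil => simp [pvZero_nil]
  | cons j pre ih =>
    rw [pvZero_cons]
    have hj0 : 0 ≤ j := hpre j (by simp)
    rw [ih (v.set j.toNat 0) (fun x hx => hpre x (by simp [hx]))]
    by_cases hmem : (p : Int) ∈ pre
    · simp [hmem]
    · by_cases hpj : (p : Int) = j
      · have hpj' : j.toNat = p := by omega
        by_cases hlen : p < v.length
        · simp [hpj, hpj', hlen]
        · simp [hpj, hpj', hlen]
      · have hne : j.toNat ≠ p := by omega
        simp [hmem, hpj, hne]

theorem pvIndex?_first (l : List Int) (d : Int) (k : Nat) (hk : k < l.length)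
    (hv : l[k]? = some d) (hb : ∀ p, p < k → l[p]? ≠ some d) :
    PySem.List.index? l d = some k := by
  have hkv : l[k] = d := by
    have := List.getElem?_eq_getElem hk
    rw [this] at hv; exact Option.some.inj hv
  have hmem : d ∈ l := hkv ▸ List.getElem_mem hk
  have hsome : (PySem.List.index? l d).isSome := (PySem.List.index?_isSome_iff l d).mpr hmem
  obtain ⟨k', hk'⟩ := Option.isSome_iff_exists.mp hsome
  obtain ⟨hlt, hval, hfirst⟩ := PySem.List.getElem_of_index?_eq_some hk'
  rcases Nat.lt_trichotomy k' k with h | h | h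
  · exact absurd (by rw [List.getElem?_eq_getElem hlt, hval]) (hb k' h)
  · rw [hk', h]
  · exact absurd hkv (hfirst k h)

theorem pvGetElem?_eq (v : List Int) (p : Nat) (h : p < v.length) : v[p]? = some (v.getD p 0) := by
  rw [List.getElem?_eq_getElem h, List.getD_eq_getElem _ _ h]

theorem pvKey_eq (v : List Int) (q : Int) (h0 : 0 ≤ q) (h1 : q < (v.length : Int)) :
    pvKey v q = v.getD q.toNat 0 := by
  unfold pvKey
  rw [PySem.List.pyGetD_eq_getElem v 0 h0 h1, List.getD_eq_getElem _ _ (by omega)]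

theorem pvF_of_zero {v : List Int} {j : Int} (h : pvKey v j = 0) : pvF v j = pvM0 v := by
  unfold pvKey at h; unfold pvF; simp [h]

theorem pvF_of_ne {v : List Int} {j : Int} (h : pvKey v j ≠ 0) : pvF v j = j := by
  unfold pvKey at h; unfold pvF; simp [h]

theorem pvFold_gen (v : List Int) :
    ∀ (js : List Int) (pre suf : List Int), pvArgsort v = pre ++ js ++ suf → ∀ (acc : List Int),
    (js.map (pvKey v)).foldl pvStepA (pvZero v (pre.map (pvF v)), acc)
      = (pvZero v ((pre ++ js).map (pvF v)), acc ++ js.map (pvF v))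
  | [], pre, suf, hdec, acc => by simp
  | j :: js, pre, suf, hdec, acc => by
    have hdec2 : pvArgsort v = pre ++ j :: (js ++ suf) := by rw [hdec]; simp
    have hj : j ∈ pvArgsort v := by rw [hdec2]; simp
    obtain ⟨hj0, hjlen⟩ := pvMem_argsort hj
    have hjlen' : j.toNat < v.length := by omega
    have hkeyj : pvKey v j = v.getD j.toNat 0 := pvKey_eq v j hj0 hjlen
    have hlex := pvArgsort_pairwise_lex v
    rw [hdec2, List.pairwise_append, List.pairwise_cons] at hlex
    have hq_j : ∀ q ∈ pre, pvLex (pvKey v) q j := fun q hq => hlex.2.2 q hq j (by simp)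
    have hj_r : ∀ r ∈ js ++ suf, pvLex (pvKey v) j r := hlex.2.1.1
    have hnd := pvArgsort_nodup v
    rw [hdec2] at hnd
    have hjpre : j ∉ pre := fun hmem =>
      (List.disjoint_of_nodup_append hnd) hmem List.mem_cons_self
    have hloc : ∀ q : Int, 0 ≤ q → q < (v.length : Int) → q ∈ pre ∨ q = j ∨ q ∈ js ++ suf := by
      intro q h0 h1
      have hqa : q ∈ pvArgsort v := pvMem_argsort_of h0 h1
      rw [hdec2] at hqa
      rcases List.mem_append.mp hqa with h | h
      · exact Or.inl h
      · rcases List.mem_cons.mp h with h | h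
        · exact Or.inr (Or.inl h)
        · exact Or.inr (Or.inr h)
    have hprebnd : ∀ q ∈ pre, 0 ≤ q ∧ q < (v.length : Int) := by
      intro q hq
      exact pvMem_argsort (by rw [hdec2]; exact List.mem_append_left _ hq)
    have hm0nonneg : (0 : Int) ≤ pvM0 v := by unfold pvM0; positivity
    have hpre0 : ∀ y ∈ pre.map (pvF v), 0 ≤ y := by
      intro y hy
      obtain ⟨q, hq, rfl⟩ := List.mem_map.mp hy
      by_cases h : pvKey v q = 0
      · rw [pvF_of_zero h]; exact hm0nonneg
      · rw [pvF_of_ne h]; exact (hprebnd q hq).1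
    have hidx : PySem.List.index? (pvZero v (pre.map (pvF v))) (pvKey v j)
        = some ((pvF v j).toNat) := by
      by_cases hd0 : pvKey v j = 0
      · -- d = 0 : the scan lands on the first non-positive position
        obtain ⟨m, hmlen, hm0, hmle, hmmin, _⟩ :=
          pvM0_spec v j.toNat hjlen' (by rw [← hkeyj, hd0])
        rw [pvF_of_zero hd0, hm0, Int.toNat_natCast, hd0]
        have hmbnd : (0 : Int) ≤ (m : Int) ∧ (m : Int) < (v.length : Int) := by
          constructor <;> [positivity; exact_mod_cast hmlen]
        refine pvIndex?_first _ _ _ (by rw [pvZero_length]; exact hmlen) ?_ ?_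
        · rw [pvZero_getElem? v _ hpre0 m]
          by_cases hmem : ((m : Int) ∈ pre.map (pvF v))
          · simp [hmem, hmlen]
          · simp only [hmem, if_neg, not_false_iff]
            rw [pvGetElem?_eq v m hmlen]
            rcases lt_or_eq_of_le hmle with hlt | heq
            · exfalso
              have hkm : pvKey v (m : Int) = v.getD m 0 := by
                have := pvKey_eq v (m : Int) hmbnd.1 hmbnd.2
                simpa using this
              rcases hloc (m : Int) hmbnd.1 hmbnd.2 with hin | heqj | hafter
              · refine hmem ?_
                have hfm : pvF v (m : Int) = (m : Int) := pvF_of_ne (by rw [hkm]; omega)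
                exact hfm ▸ List.mem_map_of_mem hin
              · rw [heqj, hd0] at hkm; omega
              · rcases hj_r _ hafter with h | ⟨h, _⟩ <;> rw [hd0, hkm] at h <;> omega
            · rw [heq]
        · intro p hp
          rw [pvZero_getElem? v _ hpre0 p]
          have hplen : p < v.length := by omega
          have hvp : 0 < v.getD p 0 := hmmin p hp
          by_cases hmem : ((p : Int) ∈ pre.map (pvF v))
          · exfalso
            obtain ⟨q, hq, hfq⟩ := List.mem_map.mp hmem
            by_cases hkq0 : pvKey v q = 0
            · rw [pvF_of_zero hkq0, hm0] at hfq
              omega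
            · rw [pvF_of_ne hkq0] at hfq
              subst hfq
              have hkp : pvKey v (p : Int) = v.getD p 0 := by
                have := pvKey_eq v (p : Int) (by positivity) (by exact_mod_cast hplen)
                simpa using this
              rcases hq_j _ hq with h | ⟨h, _⟩ <;> rw [hd0, hkp] at h <;> omega
          · simp only [hmem, if_neg, not_false_iff]
            rw [pvGetElem?_eq v p hplen]
            intro hcontra
            have := Option.some.inj hcontra
            omega
      · -- d ≠ 0 : the scan lands on j itself
        rw [pvF_of_ne hd0]
        refine pvIndex?_first _ _ _ (by rw [pvZero_length]; exact hjlen') ?_ ?_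
        · rw [pvZero_getElem? v _ hpre0 j.toNat]
          have hjmem : ((j.toNat : Int)) ∉ pre.map (pvF v) := by
            rw [Int.toNat_of_nonneg hj0]
            intro hmem
            obtain ⟨q, hq, hfq⟩ := List.mem_map.mp hmem
            by_cases hkq0 : pvKey v q = 0
            · rw [pvF_of_zero hkq0] at hfq
              have hqbnd := hprebnd q hq
              have hkq : pvKey v q = v.getD q.toNat 0 := pvKey_eq v q hqbnd.1 hqbnd.2
              obtain ⟨m, hmlen, hm0, hmle, _, _⟩ :=
                pvM0_spec v q.toNat (by omega) (by rw [← hkq, hkq0])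
              rw [hm0] at hfq
              rcases hq_j _ hq with h | ⟨h, _⟩ <;> rw [hkq0] at h
              · rw [hkeyj] at h
                have hjm : j.toNat = m := by omega
                rw [hjm] at h
                omega
              · exact hd0 (by rw [← h])
            · rw [pvF_of_ne hkq0] at hfq
              exact hjpre (hfq ▸ hq)
          simp only [hjmem, if_neg, not_false_iff]
          rw [pvGetElem?_eq v j.toNat hjlen', hkeyj]
        · intro p hp
          rw [pvZero_getElem? v _ hpre0 p]
          have hplen : p < v.length := by omega
          by_cases hmem : ((p : Int) ∈ pre.map (pvF v))
          · simp only [hmem, if_pos, hplen]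
            intro hcontra
            exact hd0 (by have := Option.some.inj hcontra; omega)
          · simp only [hmem, if_neg, not_false_iff]
            rw [pvGetElem?_eq v p hplen]
            intro hcontra
            have hpv : v.getD p 0 = pvKey v j := Option.some.inj hcontra
            have hkp : pvKey v (p : Int) = v.getD p 0 := by
              have := pvKey_eq v (p : Int) (by positivity) (by exact_mod_cast hplen)
              simpa using this
            rcases hloc (p : Int) (by positivity) (by exact_mod_cast hplen) with hin | heqj | hafter
            · have hfp : pvF v (p : Int) = (p : Int) := pvF_of_ne (by rw [hkp, hpv]; exact hd0)
              exact hmem (hfp ▸ List.mem_map_of_mem hin)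
            · omega
            · rcases hj_r _ hafter with h | ⟨h, hlt⟩
              · rw [hkp, hpv] at h; omega
              · rw [hkp, hpv] at h; omega
    have hfj0 : 0 ≤ pvF v j := by
      by_cases h : pvKey v j = 0
      · rw [pvF_of_zero h]; exact hm0nonneg
      · rw [pvF_of_ne h]; exact hj0
    have hidx' : List.idxOf? (pvKey v j) (pvZero v (pre.map (pvF v))) = some ((pvF v j).toNat) := by
      rw [← PySem.List.index?_eq_idxOf?]; exact hidx
    have hstep : pvStepA (pvZero v (pre.map (pvF v)), acc) (pvKey v j) =
        (pvZero v ((pre ++ [j]).map (pvF v)), acc ++ [pvF v j]) := by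
      simp [pvStepA, hidx', pvZero_append, Int.toNat_of_nonneg hfj0]
    have hdec' : pvArgsort v = (pre ++ [j]) ++ js ++ suf := by
      rw [hdec2]; simp
    calc ((j :: js).map (pvKey v)).foldl pvStepA (pvZero v (pre.map (pvF v)), acc)
        = (js.map (pvKey v)).foldl pvStepA (pvZero v ((pre ++ [j]).map (pvF v)), acc ++ [pvF v j]) := by
          rw [List.map_cons, List.foldl_cons, hstep]
      _ = (pvZero v (((pre ++ [j]) ++ js).map (pvF v)), (acc ++ [pvF v j]) ++ js.map (pvF v)) :=
          pvFold_gen v js (pre ++ [j]) suf hdec' (acc ++ [pvF v j])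
      _ = (pvZero v ((pre ++ j :: js).map (pvF v)), acc ++ (j :: js).map (pvF v)) := by simp

theorem pvRow (v : List Int) (n : Nat) :
    (((PySem.List.sorted v (fun x => x) false).take n).foldl pvStepA (v, ([] : List Int))).2
      = ((pvArgsort v).take n).map (pvF v) := by
  have h1 : (PySem.List.sorted v (fun x => x) false).take n = ((pvArgsort v).take n).map (pvKey v) := by
    rw [pvSorted_eq v, List.map_take]
  rw [h1]
  have h2 := pvFold_gen v ((pvArgsort v).take n) [] ((pvArgsort v).drop n) (by simp) []
  simp only [List.map_nil, List.nil_append] at h2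
  rw [pvZero_nil] at h2
  rw [h2]

-- ---- no-deviation rows: pvF is the identity on the argsort prefix ----

theorem pvLen_le {l1 l2 : List Int} (h1 : l1.Nodup) (h2 : l1 ⊆ l2) : l1.length ≤ l2.length :=
  (List.subperm_of_subset h1 h2).length_le

theorem pvCountP (v : List Int) (p : Int → Bool) :
    ((PySem.List.pyRange 0 (v.length : Int) 1).filter (fun q => p (pvKey v q))).length = v.countP p := by
  conv_rhs => rw [← PySem.List.map_pyGetD_pyRange_zero' v 0]
  rw [List.countP_map, List.countP_eq_length_filter]
  rfl

theorem pvDecomp (v : List Int) (t : Nat) (j : Int) (hj : j ∈ (pvArgsort v).take t) :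
    ∃ pre suf, pvArgsort v = pre ++ j :: suf ∧ pre.length < t ∧
      ∀ q : Int, 0 ≤ q → q < (v.length : Int) → pvLex (pvKey v) q j → q ∈ pre := by
  have hmem : j ∈ pvArgsort v := List.take_subset t _ hj
  obtain ⟨pre, suf, hdec⟩ := List.append_of_mem hmem
  have hnd := pvArgsort_nodup v
  rw [hdec] at hnd
  refine ⟨pre, suf, hdec, ?_, ?_⟩
  · by_contra hge
    push_neg at hge
    rw [hdec, List.take_append_of_le_length (by omega)] at hj
    exact (List.disjoint_of_nodup_append hnd) (List.take_subset t _ hj) List.mem_cons_self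
  · intro q h0 h1 hlex
    have hq : q ∈ pvArgsort v := pvMem_argsort_of h0 h1
    rw [hdec] at hq
    rcases List.mem_append.mp hq with h | h
    · exact h
    · rcases List.mem_cons.mp h with rfl | h
      · rcases hlex with h' | ⟨_, h'⟩ <;> omega
      · exfalso
        have hp := pvArgsort_pairwise_lex v
        rw [hdec, List.pairwise_append] at hp
        have h2 := (List.pairwise_cons.mp hp.2.1).1 q h
        rcases hlex with h1' | ⟨h1', h2'⟩ <;> rcases h2 with h2'' | ⟨h2'', h3''⟩ <;> omega

theorem pvDev_of_bad (v : List Int) (t : Nat) (j : Int)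
    (hj : j ∈ (pvArgsort v).take t) (hkey : pvKey v j = 0) (hne : pvM0 v ≠ j) :
    pvDev v t := by
  obtain ⟨hj0, hjlen⟩ := pvMem_argsort (List.take_subset t _ hj)
  have hjnat : j.toNat < v.length := by omega
  have hjval : v.getD j.toNat 0 = 0 := by rw [← pvKey_eq v j hj0 hjlen]; exact hkey
  have h0mem : (0 : Int) ∈ v := by
    have h1 : v[j.toNat] = 0 := by
      rw [← List.getD_eq_getElem v 0 hjnat]; exact hjval
    exact h1 ▸ List.getElem_mem hjnat
  obtain ⟨m, hmlen, hm0, hmle0, hmmin, hmlej⟩ :=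
    pvM0_spec v j.toNat hjnat (le_of_eq hjval)
  have hmne : m ≠ j.toNat := by
    intro h
    exact hne (by rw [hm0, h, Int.toNat_of_nonneg hj0])
  have hmlt : m < j.toNat := by omega
  obtain ⟨pre, suf, hdec, hprelt, hpremem⟩ := pvDecomp v t j hj
  -- all indices with negative value sit in pre
  have hL0sub : ((PySem.List.pyRange 0 (v.length : Int) 1).filter
      (fun q => decide (pvKey v q < 0))) ⊆ pre := by
    intro q hq
    rw [List.mem_filter] at hq
    obtain ⟨hq1, hq2⟩ := hq
    obtain ⟨hq0, hqlen⟩ := PySem.List.mem_pyRange_one.mp hq1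
    exact hpremem q hq0 hqlen (Or.inl (by rw [hkey]; exact of_decide_eq_true hq2))
  have hL0nd : ((PySem.List.pyRange 0 (v.length : Int) 1).filter
      (fun q => decide (pvKey v q < 0))).Nodup :=
    (PySem.List.nodup_pyRange_one _ _).filter _
  have hnegct : v.countP (fun x => decide (x < 0)) ≤ pre.length := by
    rw [← pvCountP v (fun x => decide (x < 0))]
    exact pvLen_le hL0nd hL0sub
  refine ⟨by simpa using h0mem, by omega, ?_⟩
  rcases lt_or_eq_of_le hmle0 with hmneg | hmzero
  · -- a negative entry strictly before the first zero
    refine Or.inl ?_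
    have hfneg : v.findIdx (fun x => decide (x < 0)) = m := by
      rw [List.findIdx_eq hmlen]
      constructor
      · rw [← List.getD_eq_getElem v 0 hmlen]
        exact decide_eq_true hmneg
      · intro p hp
        have := hmmin p hp
        rw [← List.getD_eq_getElem v 0 (by omega)]
        simp only [decide_eq_false_iff_not, not_lt]
        omega
    have hfzero : m < v.idxOf 0 := by
      show m < v.findIdx (· == (0 : Int))
      refine List.lt_findIdx_of_not hmlen ?_
      intro q hq
      rw [← List.getD_eq_getElem v 0 (by omega)]
      simp only [beq_iff_eq]
      rcases Nat.lt_or_ge q m with h | h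
      · have := hmmin q h; omega
      · have : q = m := by omega
        subst this; omega
    omega
  · -- a second zero: position m is a zero strictly before j
    have hmkey : pvKey v (m : Int) = 0 := by
      rw [pvKey_eq v (m : Int) (by positivity) (by exact_mod_cast hmlen)]
      simp only [Int.toNat_natCast]
      exact hmzero
    have hmpre : (m : Int) ∈ pre := by
      refine hpremem (m : Int) (by positivity) (by exact_mod_cast hmlen) (Or.inr ⟨by rw [hmkey, hkey], ?_⟩)
      omega
    have hmnotL0 : (m : Int) ∉ ((PySem.List.pyRange 0 (v.length : Int) 1).filter
        (fun q => decide (pvKey v q < 0))) := by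
      intro hmem
      rw [List.mem_filter] at hmem
      have := of_decide_eq_true hmem.2
      omega
    have hsub1 : (((PySem.List.pyRange 0 (v.length : Int) 1).filter
        (fun q => decide (pvKey v q < 0))) ++ [(m : Int)]) ⊆ pre := by
      intro q hq
      rcases List.mem_append.mp hq with h | h
      · exact hL0sub h
      · simp only [List.mem_singleton] at h; subst h; exact hmpre
    have hnd1 : (((PySem.List.pyRange 0 (v.length : Int) 1).filter
        (fun q => decide (pvKey v q < 0))) ++ [(m : Int)]).Nodup := by
      rw [List.nodup_append]
      refine ⟨hL0nd, List.nodup_singleton _, ?_⟩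
      intro a ha b hb
      have hab : b = (m : Int) := by simpa using hb
      subst hab
      intro hab2
      exact hmnotL0 (hab2 ▸ ha)
    have hlen1 := pvLen_le hnd1 hsub1
    rw [List.length_append, List.length_singleton, pvCountP v (fun x => decide (x < 0))] at hlen1
    refine Or.inr ⟨?_, by omega⟩
    -- two distinct zero positions: m and j.toNat
    have hzsub : ([(m : Int), j]) ⊆ ((PySem.List.pyRange 0 (v.length : Int) 1).filter
        (fun q => decide (pvKey v q = 0))) := by
      intro q hq
      rcases List.mem_cons.mp hq with rfl | hq
      · rw [List.mem_filter]
        exact ⟨PySem.List.mem_pyRange_one.mpr ⟨by positivity, by exact_mod_cast hmlen⟩,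
               decide_eq_true hmkey⟩
      · simp only [List.mem_singleton] at hq; subst hq
        rw [List.mem_filter]
        exact ⟨PySem.List.mem_pyRange_one.mpr ⟨hj0, hjlen⟩, decide_eq_true hkey⟩
    have hmj : (m : Int) ≠ j := by omega
    have hznd : ([(m : Int), j]).Nodup := by simp [hmj]
    have hle := pvLen_le hznd hzsub
    rw [pvCountP v (fun x => decide (x = 0))] at hle
    have hcnt : v.count 0 = v.countP (fun x => decide (x = 0)) := by
      show v.countP (· == (0 : Int)) = _
      exact List.countP_congr (fun a _ => by simp)
    rw [hcnt]
    simpa using hle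

theorem pvTake_map_id (v : List Int) (t : Nat) (hnd : ¬ pvDev v t) :
    ((pvArgsort v).take t).map (pvF v) = (pvArgsort v).take t := by
  have h : ∀ j ∈ (pvArgsort v).take t, pvF v j = j := by
    intro j hj
    by_cases hkey : pvKey v j = 0
    · rw [pvF_of_zero hkey]
      by_contra hne
      exact hnd (pvDev_of_bad v t j hj hkey hne)
    · exact pvF_of_ne hkey
  calc ((pvArgsort v).take t).map (pvF v) = ((pvArgsort v).take t).map id :=
        List.map_congr_left h
    _ = (pvArgsort v).take t := List.map_id _

-- ---- tightness: inside D_ the two ports disagree on every input ----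

theorem pvKeyN (v : List Int) (q : Nat) (h : q < v.length) : pvKey v (q : Int) = v.getD q 0 := by
  have := pvKey_eq v (q : Int) (by positivity) (by exact_mod_cast h)
  simpa using this

theorem pvFoldl_mapgen {α : Type} (g : List α → Int → List α) (f : Int → α)
    (hg : ∀ a i, g a i = a ++ [f i]) :
    ∀ (l : List Int) (acc : List α), l.foldl g acc = acc ++ l.map f
  | [], acc => by simp
  | x :: l, acc => by
    rw [List.foldl_cons, hg, pvFoldl_mapgen g f hg l]
    simp

theorem pvFoldl_ne {α : Type} (g h : List α → Int → List α) (f f' : Int → α)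
    (hg : ∀ a i, g a i = a ++ [f i]) (hh : ∀ a i, h a i = a ++ [f' i])
    (l : List Int) (i : Int) (hi : i ∈ l) (hne : f i ≠ f' i) :
    l.foldl g [] ≠ l.foldl h [] := by
  rw [pvFoldl_mapgen g f hg l [], pvFoldl_mapgen h f' hh l []]
  simp only [List.nil_append]
  intro heq
  exact hne (List.map_eq_map_iff.mp heq i hi)

theorem pvMem_take (v : List Int) (t : Nat) (j : Int) (h0 : 0 ≤ j) (h1 : j < (v.length : Int))
    (hrank : ((PySem.List.pyRange 0 (v.length : Int) 1).filter
      (fun q => decide (pvKey v q < pvKey v j ∨ (pvKey v q = pvKey v j ∧ q < j)))).length < t) :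
    j ∈ (pvArgsort v).take t := by
  have hj : j ∈ pvArgsort v := pvMem_argsort_of h0 h1
  obtain ⟨pre, suf, hdec⟩ := List.append_of_mem hj
  have hndA := pvArgsort_nodup v
  rw [hdec] at hndA
  have hpresub : pre ⊆ (PySem.List.pyRange 0 (v.length : Int) 1).filter
      (fun q => decide (pvKey v q < pvKey v j ∨ (pvKey v q = pvKey v j ∧ q < j))) := by
    intro q hq
    rw [List.mem_filter]
    have hb := pvMem_argsort (v := v) (j := q) (by rw [hdec]; exact List.mem_append_left _ hq)
    refine ⟨PySem.List.mem_pyRange_one.mpr hb, decide_eq_true ?_⟩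
    have hp := pvArgsort_pairwise_lex v
    rw [hdec, List.pairwise_append] at hp
    exact hp.2.2 q hq j List.mem_cons_self
  have hpre : pre.length < t :=
    lt_of_le_of_lt (pvLen_le (List.nodup_append.mp hndA).1 hpresub) hrank
  have hlt : pre.length < ((pre ++ j :: suf).take t).length := by
    simp only [List.length_take, List.length_append, List.length_cons]
    omega
  have hget : ((pre ++ j :: suf).take t)[pre.length]'hlt = j := by
    rw [List.getElem_take, List.getElem_append_right (le_refl pre.length)]
    simp
  rw [hdec]
  have hmem2 := List.getElem_mem hlt
  rwa [hget] at hmem2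

theorem pvRemove_count (l : List Int) (x y : Int) :
    ((PySem.List.remove? l x).getD l).count y = l.count y - (if x = y ∧ x ∈ l then 1 else 0) := by
  by_cases hm : x ∈ l
  · rw [PySem.List.remove?_eq_some_erase (xs := l) (v := x) hm, Option.getD_some, List.count_erase]
    by_cases hxy : x = y
    · subst hxy
      simp [hm]
    · simp [beq_iff_eq, hxy]
  · rw [(PySem.List.remove?_eq_none_iff l x).mpr hm]
    simp [hm]

theorem pvRow_ne (v : List Int) (t : Nat) (hdev : pvDev v t) (i : Int) :
    (PySem.List.remove? (((pvArgsort v).take t).map (pvF v)) i).getD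
        (((pvArgsort v).take t).map (pvF v))
      ≠ (PySem.List.remove? ((pvArgsort v).take t) i).getD ((pvArgsort v).take t) := by
  obtain ⟨hc0, hnegt, hcase⟩ := hdev
  have h0v : (0 : Int) ∈ v := by simpa using hc0
  have hz0len : v.idxOf 0 < v.length := List.idxOf_lt_length_of_mem h0v
  set z0 := v.idxOf 0 with hz0
  have hz0val : v.getD z0 0 = 0 := by
    have h := @List.findIdx_getElem _ (· == (0 : Int)) v (by exact hz0len)
    rw [List.getD_eq_getElem _ _ hz0len]
    simpa using h
  have hz0min : ∀ q, q < z0 → v.getD q 0 ≠ 0 := by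
    intro q hq
    have h := @List.not_of_lt_findIdx _ (· == (0 : Int)) v q (by exact hq)
    rw [List.getD_eq_getElem _ _ (by omega)]
    simpa using h
  obtain ⟨m, hmlen, hm0, hmle0, hmmin, hmlez⟩ := pvM0_spec v z0 hz0len (le_of_eq hz0val)
  have hnegf : ((PySem.List.pyRange 0 (v.length : Int) 1).filter
      (fun q => decide (pvKey v q < 0))).length < t := by
    rw [pvCountP v (fun x => decide (x < 0))]
    exact hnegt
  have hz0P : ((z0 : Nat) : Int) ∈ (pvArgsort v).take t := by
    refine pvMem_take v t _ (by positivity) (by exact_mod_cast hz0len) ?_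
    refine lt_of_le_of_lt ?_ hnegf
    refine pvLen_le ((PySem.List.nodup_pyRange_one _ _).filter _) ?_
    intro q hq
    rw [List.mem_filter] at hq ⊢
    obtain ⟨hq1, hq2⟩ := hq
    obtain ⟨hqb1, hqb2⟩ := PySem.List.mem_pyRange_one.mp hq1
    have hkeyq := pvKey_eq v q hqb1 hqb2
    have hkeyz : pvKey v (z0 : Int) = 0 := by rw [pvKeyN v z0 hz0len]; exact hz0val
    refine ⟨hq1, decide_eq_true ?_⟩
    rcases of_decide_eq_true hq2 with h | ⟨h, hlt⟩
    · rw [hkeyz] at h; exact h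
    · exfalso
      rw [hkeyz] at h
      exact hz0min q.toNat (by omega) (by rw [← hkeyq]; exact h)
  have hmain : ∃ e1 e2, e1 ∈ (pvArgsort v).take t ∧ e2 ∈ (pvArgsort v).take t ∧ e1 ≠ e2 ∧
      pvF v e1 = (pvM0 v) ∧ pvF v e2 = (pvM0 v) := by
    rcases lt_or_eq_of_le hmle0 with hmneg | hmzero
    · -- first non-positive entry is negative
      refine ⟨(m : Int), (z0 : Int), ?_, hz0P, ?_, ?_, ?_⟩
      · refine pvMem_take v t _ (by positivity) (by exact_mod_cast hmlen) ?_
        have hsub : (((PySem.List.pyRange 0 (v.length : Int) 1).filter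
            (fun q => decide (pvKey v q < pvKey v (m : Int) ∨ (pvKey v q = pvKey v (m : Int) ∧ q < (m : Int))))) ++ [(m : Int)]) ⊆
            ((PySem.List.pyRange 0 (v.length : Int) 1).filter (fun q => decide (pvKey v q < 0))) := by
          intro q hq
          rcases List.mem_append.mp hq with hq | hq
          · rw [List.mem_filter] at hq ⊢
            obtain ⟨hq1, hq2⟩ := hq
            obtain ⟨hqb1, hqb2⟩ := PySem.List.mem_pyRange_one.mp hq1
            have hkeyq := pvKey_eq v q hqb1 hqb2
            have hkeym : pvKey v (m : Int) = v.getD m 0 := pvKeyN v m hmlen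
            refine ⟨hq1, decide_eq_true ?_⟩
            rcases of_decide_eq_true hq2 with h | ⟨h, hlt⟩
            · rw [hkeym] at h; omega
            · exfalso
              have h1 := hmmin q.toNat (by omega)
              rw [hkeym] at h
              rw [hkeyq] at h
              omega
          · simp only [List.mem_singleton] at hq
            subst hq
            rw [List.mem_filter]
            refine ⟨PySem.List.mem_pyRange_one.mpr ⟨by positivity, by exact_mod_cast hmlen⟩,
              decide_eq_true ?_⟩
            rw [pvKeyN v m hmlen]; exact hmneg
        have hnd2 : ((((PySem.List.pyRange 0 (v.length : Int) 1).filter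
            (fun q => decide (pvKey v q < pvKey v (m : Int) ∨ (pvKey v q = pvKey v (m : Int) ∧ q < (m : Int)))))) ++ [(m : Int)]).Nodup := by
          rw [List.nodup_append]
          refine ⟨(PySem.List.nodup_pyRange_one _ _).filter _, List.nodup_singleton _, ?_⟩
          intro a ha b hb
          simp only [List.mem_singleton] at hb
          subst hb
          intro hab
          subst hab
          rw [List.mem_filter] at ha
          rcases of_decide_eq_true ha.2 with h | ⟨h, hlt⟩ <;> omega
        have hle := pvLen_le hnd2 hsub
        rw [List.length_append, List.length_singleton,
            pvCountP v (fun x => decide (x < 0))] at hle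
        omega
      · intro h
        have hmz : m = z0 := by exact_mod_cast h
        rw [hmz] at hmneg
        omega
      · rw [pvF_of_ne (by rw [pvKeyN v m hmlen]; omega)]
        exact hm0.symm
      · rw [pvF_of_zero (by rw [pvKeyN v z0 hz0len]; exact hz0val)]
    · -- first non-positive entry is the first zero: m = z0, a second zero is in the prefix
      have hmz : m = z0 := by
        by_contra hne'
        exact hz0min m (by omega) hmzero
      have hb : 2 ≤ v.count 0 ∧ v.countP (fun x => decide (x < 0)) + 2 ≤ t := by
        rcases hcase with ha | hb
        · exfalso
          have hfl : v.findIdx (fun x => decide (x < 0)) < v.length := by omega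
          have hneg := @List.findIdx_getElem _ (fun x => decide (x < 0)) v hfl
          have hpos := hmmin (v.findIdx (fun x => decide (x < 0))) (by omega)
          rw [List.getD_eq_getElem _ _ hfl] at hpos
          simp only [decide_eq_true_eq] at hneg
          omega
        · exact hb
      obtain ⟨hz2, hnt2⟩ := hb
      have hcnt : v.count 0 = v.countP (fun x => decide (x = 0)) := by
        show v.countP (· == (0 : Int)) = _
        exact List.countP_congr (fun a _ => by simp)
      have hF0len : 2 ≤ ((PySem.List.pyRange 0 (v.length : Int) 1).filter
          (fun q => decide (pvKey v q = 0))).length := by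
        rw [pvCountP v (fun x => decide (x = 0))]
        omega
      obtain ⟨q0, l1, h1⟩ := List.exists_cons_of_ne_nil
        (l := (PySem.List.pyRange 0 (v.length : Int) 1).filter (fun q => decide (pvKey v q = 0)))
        (by intro h; rw [h] at hF0len; simp at hF0len)
      obtain ⟨q1, rest, h2⟩ := List.exists_cons_of_ne_nil (l := l1)
        (by intro h; rw [h] at h1; rw [h1] at hF0len; simp at hF0len)
      rw [h2] at h1
      have hq1mem : q1 ∈ (PySem.List.pyRange 0 (v.length : Int) 1).filter
          (fun q => decide (pvKey v q = 0)) := by rw [h1]; simp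
      rw [List.mem_filter] at hq1mem
      obtain ⟨hq1r, hq1z⟩ := hq1mem
      obtain ⟨hq1b1, hq1b2⟩ := PySem.List.mem_pyRange_one.mp hq1r
      have hq1key : pvKey v q1 = 0 := of_decide_eq_true hq1z
      have hq0mem : q0 ∈ (PySem.List.pyRange 0 (v.length : Int) 1).filter
          (fun q => decide (pvKey v q = 0)) := by rw [h1]; simp
      rw [List.mem_filter] at hq0mem
      obtain ⟨hq0r, hq0z⟩ := hq0mem
      obtain ⟨hq0b1, hq0b2⟩ := PySem.List.mem_pyRange_one.mp hq0r
      have hq0key : pvKey v q0 = 0 := of_decide_eq_true hq0z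
      have hpw : (((PySem.List.pyRange 0 (v.length : Int) 1).filter
          (fun q => decide (pvKey v q = 0)))).Pairwise (· < ·) :=
        (PySem.List.pairwise_lt_pyRange_one 0 _).filter _
      rw [h1] at hpw
      have hq0q1 : q0 < q1 := (List.pairwise_cons.mp hpw).1 q1 (by simp)
      have hz0q0 : ((z0 : Nat) : Int) ≤ q0 := by
        by_contra h
        push_neg at h
        exact hz0min q0.toNat (by omega) (by rw [← pvKey_eq v q0 hq0b1 hq0b2]; exact hq0key)
      have hq1P : q1 ∈ (pvArgsort v).take t := by
        refine pvMem_take v t _ hq1b1 hq1b2 ?_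
        have hsub : ((PySem.List.pyRange 0 (v.length : Int) 1).filter
            (fun q => decide (pvKey v q < pvKey v q1 ∨ (pvKey v q = pvKey v q1 ∧ q < q1)))) ⊆
            (((PySem.List.pyRange 0 (v.length : Int) 1).filter
              (fun q => decide (pvKey v q < 0))) ++ [q0]) := by
          intro q hq
          rw [List.mem_filter] at hq
          obtain ⟨hqr, hql⟩ := hq
          rcases of_decide_eq_true hql with h | ⟨h, hlt⟩
          · refine List.mem_append_left _ ?_
            rw [List.mem_filter]
            exact ⟨hqr, decide_eq_true (by rw [hq1key] at h; exact h)⟩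
          · have hqF0 : q ∈ (PySem.List.pyRange 0 (v.length : Int) 1).filter
                (fun q => decide (pvKey v q = 0)) := by
              rw [List.mem_filter]
              exact ⟨hqr, decide_eq_true (by rw [hq1key] at h; exact h)⟩
            rw [h1] at hqF0
            rcases List.mem_cons.mp hqF0 with rfl | hqF0'
            · exact List.mem_append_right _ (by simp)
            rcases List.mem_cons.mp hqF0' with rfl | hqrest
            · omega
            · exfalso
              have := (List.pairwise_cons.mp (List.pairwise_cons.mp hpw).2).1 q hqrest
              omega
        have hnd2 : ((((PySem.List.pyRange 0 (v.length : Int) 1).filter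
            (fun q => decide (pvKey v q < 0)))) ++ [q0]).Nodup := by
          rw [List.nodup_append]
          refine ⟨(PySem.List.nodup_pyRange_one _ _).filter _, List.nodup_singleton _, ?_⟩
          intro a ha b hb
          simp only [List.mem_singleton] at hb
          subst hb
          intro hab
          subst hab
          rw [List.mem_filter] at ha
          have := of_decide_eq_true ha.2
          omega
        have hle := pvLen_le ((PySem.List.nodup_pyRange_one _ _).filter _) hsub
        rw [List.length_append, List.length_singleton] at hle
        have h3 := pvCountP v (fun x => decide (x < 0))
        omega
      refine ⟨((z0 : Nat) : Int), q1, hz0P, hq1P, by omega, ?_, ?_⟩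
      · rw [pvF_of_zero (by rw [pvKeyN v z0 hz0len]; exact hz0val)]
      · rw [pvF_of_zero hq1key]
  obtain ⟨e1, e2, he1, he2, hne12, hf1, hf2⟩ := hmain
  have hPnd : ((pvArgsort v).take t).Nodup := (List.take_sublist _ _).nodup (pvArgsort_nodup v)
  have hA2 : 2 ≤ (((pvArgsort v).take t).map (pvF v)).count (pvM0 v) := by
    have hsub : [e1, e2] ⊆ ((pvArgsort v).take t).filter (fun j => pvF v j == (pvM0 v)) := by
      intro q hq
      rcases List.mem_cons.mp hq with rfl | hq
      · rw [List.mem_filter]; exact ⟨he1, by simp [hf1]⟩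
      · simp only [List.mem_singleton] at hq
        subst hq
        rw [List.mem_filter]; exact ⟨he2, by simp [hf2]⟩
    have hnd12 : ([e1, e2]).Nodup := by simp [hne12]
    have hle := pvLen_le hnd12 hsub
    have hcnt2 : (((pvArgsort v).take t).map (pvF v)).count (pvM0 v)
        = (((pvArgsort v).take t).filter (fun j => pvF v j == (pvM0 v))).length := by
      rw [List.count_eq_countP, List.countP_map, List.countP_eq_length_filter]
      rfl
    rw [hcnt2]
    simpa using hle
  have hB1 : ((pvArgsort v).take t).count (pvM0 v) ≤ 1 :=
    List.nodup_iff_count_le_one.mp hPnd (pvM0 v)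
  intro heq
  have hc := congrArg (List.count (pvM0 v)) heq
  rw [pvRemove_count, pvRemove_count] at hc
  by_cases hi : i = (pvM0 v)
  · have hmemA : (pvM0 v) ∈ ((pvArgsort v).take t).map (pvF v) := by
      rw [← List.count_pos_iff]
      omega
    rw [hi] at hc
    rw [if_pos ⟨rfl, hmemA⟩] at hc
    by_cases hmp : (pvM0 v) ∈ (pvArgsort v).take t
    · have hp1 : 0 < ((pvArgsort v).take t).count (pvM0 v) := List.count_pos_iff.mpr hmp
      rw [if_pos ⟨rfl, hmp⟩] at hc
      omega
    · have hp0 : ((pvArgsort v).take t).count (pvM0 v) = 0 := by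
        rw [List.count_eq_zero]
        exact hmp
      rw [if_neg (by simp [hmp])] at hc
      omega
  · rw [if_neg (by simp [hi]), if_neg (by simp [hi])] at hc
    omega

theorem main_tight (m : List (List Int)) (k : Int)
    (hD : ∃ v ∈ m.take (m.headD []).length, pvDev v (k + 1).toNat) :
    get_AP_neighbor m k ≠ get_AP_neighbor_alt m k := by
  obtain ⟨v0, hv0mem, hdev0⟩ := hD
  obtain ⟨i0, hi0lt, hv0⟩ := List.getElem_of_mem hv0mem
  have hi0len : i0 < (m.headD []).length ∧ i0 < m.length := by
    rw [List.length_take] at hi0lt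
    omega
  have hm_ne : m ≠ [] := by
    intro h
    subst h
    simp at hi0len
  have hrow : m[i0]'hi0len.2 = v0 := by
    rw [← hv0, List.getElem_take]
  have ht1 : 1 ≤ (k + 1).toNat := by
    obtain ⟨_, hn, _⟩ := hdev0
    omega
  have hk1' : (0 : Int) ≤ k + 1 := by omega
  unfold get_AP_neighbor get_AP_neighbor_alt
  have hnum : ((PySem.List.pyGet? m 0).getD []).length = (m.headD []).length := by
    obtain ⟨x, xs, rfl⟩ := List.exists_cons_of_ne_nil hm_ne
    simp
  rw [hnum]
  refine pvFoldl_ne _ _ _ _ (fun a i => rfl) (fun a i => rfl) _ ((i0 : Nat) : Int)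
    (PySem.List.mem_pyRange_one.mpr ⟨by positivity, by exact_mod_cast hi0len.1⟩) ?_
  set v := (PySem.List.pyGet? m ((i0 : Nat) : Int)).getD [] with hv
  have hvd : v = v0 := by
    rw [hv, PySem.List.pyGet?_of_nonneg m (by positivity)]
    simp only [Int.toNat_natCast]
    rw [List.getElem?_eq_getElem hi0len.2]
    simp [hrow]
  rw [PySem.List.slice_to _ hk1']
  rw [show (PySem.List.sorted (PySem.List.pyRange 0 ((v : List Int).length : Int) 1)
        (fun j => PySem.List.pyGetD v j 0) false) = pvArgsort v from rfl]
  rw [show (List.foldl (fun (st : List Int × List Int) d =>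
        (st.1.set ((PySem.List.index? st.1 d).getD 0) 0, st.2 ++ [((PySem.List.index? st.1 d).getD 0 : Int)]))
        (v, ([] : List Int))
        ((PySem.List.sorted v (fun x => x) false).take (k + 1).toNat)).2
      = ((pvArgsort v).take (k + 1).toNat).map (pvF v) from pvRow v (k + 1).toNat]
  exact pvRow_ne v (k + 1).toNat (by rw [hvd]; exact hdev0) _

theorem main_spec (m : List (List Int)) (k : Int)
    (hne : m ≠ []) (hlen : (m.headD []).length ≤ m.length)
    (hk1 : (m.headD []).length ≠ 0 → 0 ≤ k + 1)
    (hnd : ∀ i < (m.headD []).length, ¬ pvDev (m.getD i []) (k + 1).toNat) :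
    get_AP_neighbor m k = get_AP_neighbor_alt m k := by
  unfold get_AP_neighbor get_AP_neighbor_alt
  have hnum : ((PySem.List.pyGet? m 0).getD []).length = (m.headD []).length := by
    obtain ⟨x, xs, rfl⟩ := List.exists_cons_of_ne_nil hne
    simp
  rw [hnum]
  rcases Nat.eq_zero_or_pos (m.headD []).length with h0 | hpos
  · rw [h0]; rfl
  have hk1' : 0 ≤ k + 1 := hk1 (by omega)
  apply PySem.List.foldl_congr_mem
  intro acc i hi
  obtain ⟨hi0, hilt⟩ := PySem.List.mem_pyRange_one.mp hi
  simp only [PySem.List.slice_to _ hk1']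
  congr 1
  set v := (PySem.List.pyGet? m i).getD [] with hv
  have hvd : v = m.getD i.toNat [] := by
    rw [hv, PySem.List.pyGet?_of_nonneg m hi0,
        List.getElem?_eq_getElem (by omega : i.toNat < m.length),
        List.getD_eq_getElem m [] (show i.toNat < m.length by omega)]
    rfl
  have hndv : ¬ pvDev v (k + 1).toNat := by
    rw [hvd]; exact hnd i.toNat (by omega)
  rw [show (PySem.List.sorted (PySem.List.pyRange 0 ((v : List Int).length : Int) 1)
        (fun j => PySem.List.pyGetD v j 0) false) = pvArgsort v from rfl]
  rw [show (List.foldl (fun (st : List Int × List Int) d =>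
        (st.1.set ((PySem.List.index? st.1 d).getD 0) 0, st.2 ++ [((PySem.List.index? st.1 d).getD 0 : Int)]))
        (v, ([] : List Int))
        ((PySem.List.sorted v (fun x => x) false).take (k + 1).toNat)).2
      = ((pvArgsort v).take (k + 1).toNat).map (pvF v) from pvRow v (k + 1).toNat]
  rw [pvTake_map_id v (k + 1).toNat hndv]

-- ===== VERDICT (by name: the statement is the Claim_ definition above) =====
theorem get_AP_neighbor_spec : Claim_unchanged_get_AP_neighbor := by
  intro m k _ hpre
  unfold Spec_get_AP_neighbor
  intro hD
  obtain ⟨hne, hlen, hrows⟩ := hpre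
  rw [pvD_iff] at hD
  push_neg at hD
  refine main_spec m k hne hlen ?_ ?_
  · intro h0
    rcases hrows 0 (by omega) with ⟨_, _, hc⟩ | ⟨_, _, _, _, hc⟩ <;> omega
  · intro i hi
    have hi' : i < (m.take (m.headD []).length).length := by
      rw [List.length_take]; omega
    have hmem : m.getD i [] ∈ m.take (m.headD []).length := by
      have h1 := List.getElem_mem hi'
      rwa [List.getElem_take, ← List.getD_eq_getElem m [] (by omega : i < m.length)] at h1
    exact hD _ hmem

theorem get_AP_neighbor_changed : Claim_changed_get_AP_neighbor := by
  unfold Claim_changed_get_AP_neighbor; decide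

theorem get_AP_neighbor_tight : Claim_exact_get_AP_neighbor := by
  intro m k _ _ hD
  rw [pvD_iff] at hD
  exact main_tight m k hD
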